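-- pv_equiv track=rewrite | github.com/SMWHff/demo | 每日一题/【每日一题1021】统计频率.py | freq_seq
-- ===== SOURCE A (Python) =====
-- def freq_seq(words: str, sep: str) -> str:
--     # 定义统计字典
--     counts = {}
--     # 将传入字符串转为列表
--     result = list(words)
--     # 遍历每个字符
--     for s in words:
--         # 统计每个字符次数
--         counts[s] = counts.get(s,0) + 1
--     # 遍历列表
--     for i in range(len(words)):
--         # 将每个字符替换成该字符统计的次数
--         result[i] = str(counts[result[i]])
--     # 通过分隔符将列表转为字符串
--     return sep.join(result)
-- ===== SOURCE B (Python) =====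
-- def freq_seq(words: str, sep: str) -> str:
--     # Partition recursion: repeatedly split off every occurrence of the first
--     # remaining character, label those positions with the group size, then
--     # reassemble the labels in position order; no frequency table is built.
--     labeled = []
--     pairs = list(enumerate(words))
--     while pairs:
--         c = pairs[0][1]
--         same = [p for p in pairs if p[1] == c]
--         pairs = [p for p in pairs if p[1] != c]
--         n = str(len(same))
--         labeled.extend((i, n) for i, _ in same)
--     labeled.sort(key=lambda p: p[0])
--     return sep.join(n for _, n in labeled)
-- ===== Notes on version B (the rewrite author's own statement) =====
-- stated objective: alternative
-- what changed: Replaces the frequency dictionary plus per-position lookup with a partition recursion: repeatedly filter off all occurrences of the first remaining character, label those positions with the group's size, and finally sort the (position, label) pairs back into position order; no counting table and no per-position lookup exist.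
import Mathlib
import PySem

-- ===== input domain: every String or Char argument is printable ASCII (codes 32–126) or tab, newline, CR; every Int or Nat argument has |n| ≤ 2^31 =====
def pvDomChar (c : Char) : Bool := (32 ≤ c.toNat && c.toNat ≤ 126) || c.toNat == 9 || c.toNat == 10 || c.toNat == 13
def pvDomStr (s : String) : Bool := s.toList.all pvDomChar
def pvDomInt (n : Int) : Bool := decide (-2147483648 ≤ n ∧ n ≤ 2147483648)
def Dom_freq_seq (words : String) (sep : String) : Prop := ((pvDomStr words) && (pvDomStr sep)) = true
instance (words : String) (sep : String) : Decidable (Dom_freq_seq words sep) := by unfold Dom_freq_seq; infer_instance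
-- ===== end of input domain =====

-- B replaces A's counts dictionary + per-position lookup with a partition recursion
-- (filter off each first character's occurrences, label positions with the group
-- size, sort labels back into position order); alternative algorithm, not faster.

-- ===== PORT A =====
-- Python's 1-char strings (the elements of list(words) and the dict keys) are
-- modelled as singleton List Char.  counts[result[i]] can only raise KeyError
-- when the key is absent, which never happens (every key was inserted in the
-- first loop), so the lookup is ported as getD _ 0.
def freq_seq (words : String) (sep : String) : String :=
  let counts : PySem.Dict (List Char) Int :=
    (words.toList.map (fun c => [c])).foldl
      (fun d s => d.insert s (d.getD s 0 + 1)) PySem.Dict.empty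
  let result : List (List Char) := words.toList.map (fun c => [c])
  let result :=
    (PySem.List.pyRange 0 (PySem.Str.len words) 1).foldl
      (fun r i =>
        PySem.List.pySetD r i (PySem.Int.toChars (counts.getD (PySem.List.pyGetD r i []) 0)))
      result
  String.ofList (PySem.Chars.join sep.toList result)

-- ===== PORT B =====
-- the while loop of Source B: take the first remaining (index, char), filter the
-- equal-character pairs off, emit their labels, recurse on the rest.
def freqSeqAltLoop : List (Int × Char) → List (Int × List Char)
  | [] => []
  | (i, c) :: rest =>
      let same := ((i, c) :: rest).filter (fun p => p.2 == c)
      let others := ((i, c) :: rest).filter (fun p => !(p.2 == c))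
      same.map (fun p => (p.1, PySem.Int.toChars ((same.length : Nat) : Int)))
        ++ freqSeqAltLoop others
termination_by pairs => pairs.length
decreasing_by
  simp only [List.filter_cons, beq_self_eq_true, Bool.not_true, List.length_cons]
  exact Nat.lt_succ_of_le (List.length_filter_le _ rest)

def freq_seq_alt (words : String) (sep : String) : String :=
  let labeled := freqSeqAltLoop (PySem.List.enumerate words.toList 0)
  let labeled := PySem.List.sorted labeled (fun p => p.1) false
  String.ofList (PySem.Chars.join sep.toList (labeled.map (fun p => p.2)))

-- ===== PRECONDITION & SPEC =====
def Spec_freq_seq (words : String) (sep : String) (out : String) : Prop := out = freq_seq_alt words sep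
instance (words : String) (sep : String) (out : String) : Decidable (Spec_freq_seq words sep out) := by unfold Spec_freq_seq; infer_instance

-- ===== CLAIM (what is proved, stated in full; the proofs are below) =====
def Claim_equal_freq_seq : Prop := ∀ (words : String) (sep : String), Dom_freq_seq words sep → Spec_freq_seq words sep (freq_seq words sep)

-- ===== LEMMAS AND PROOFS =====

theorem singleton_injective : Function.Injective (fun c : Char => [c]) := by
  intro a b h; simpa using h

-- The A loop "for i in range(len(r)): r[i] = g(r[i])" maps g over the list.
theorem setmap_loop {α : Type} (g : α → α) (d : α) :
    ∀ (post pre : List α),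
      (PySem.List.pyRange (pre.length : Int) ((pre.length + post.length : Nat) : Int) 1).foldl
        (fun r i => PySem.List.pySetD r i (g (PySem.List.pyGetD r i d))) (pre ++ post)
      = pre ++ post.map g := by
  intro post
  induction post with
  | nil => intro pre; simp [PySem.List.pyRange]
  | cons x t ih =>
    intro pre
    rw [PySem.List.pyRange_one_cons (by simp only [List.length_cons]; push_cast; omega)]
    simp only [List.foldl_cons]
    have hget : PySem.List.pyGetD (pre ++ x :: t) (pre.length : Int) d = x := by
      rw [PySem.List.pyGetD_natCast]
      simp [List.getD_eq_getElem?_getD]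
    have hset : PySem.List.pySetD (pre ++ x :: t) (pre.length : Int) (g x)
        = (pre ++ [g x]) ++ t := by
      rw [PySem.List.pySetD_natCast]
      rw [List.set_append_right _ _ (le_refl pre.length)]
      simp
    rw [hget, hset]
    have := ih (pre ++ [g x])
    simp only [List.length_append, List.length_cons, List.length_nil, Nat.zero_add] at this ⊢
    rw [show (pre.length : Int) + 1 = ((pre.length + 1 : Nat) : Int) by push_cast; omega,
        show ((pre.length + (t.length + 1) : Nat) : Int) = ((pre.length + 1 + t.length : Nat) : Int) by push_cast; omega]
    rw [this]
    simp

-- A's value is the per-character frequency map joined by sep.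
theorem freq_seq_eq_canonical (words sep : String) :
    freq_seq words sep
      = String.ofList (PySem.Chars.join sep.toList
          (words.toList.map (fun c => PySem.Int.toChars ((words.toList.count c : Nat) : Int)))) := by
  unfold freq_seq
  dsimp only
  have hlen : PySem.Str.len words = ((words.toList.length : Nat) : Int) := by
    simp [PySem.Str.len_eq]
  have hloop := setmap_loop
    (fun s : List Char =>
      PySem.Int.toChars
        (((words.toList.map (fun c => [c])).foldl
            (fun d s => d.insert s (d.getD s 0 + 1)) PySem.Dict.empty).getD s 0))
    ([] : List Char) (words.toList.map (fun c => [c])) []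
  simp only [List.nil_append, List.length_nil, Nat.cast_zero, List.length_map, Nat.zero_add] at hloop
  rw [hlen, hloop]
  congr 1
  congr 1
  rw [List.map_map]
  apply List.map_congr_left
  intro c _
  simp only [Function.comp]
  rw [PySem.Dict.getD_foldl_insert_add_one, PySem.Dict.getD_empty,
      List.count_map_of_injective _ _ singleton_injective]
  simp

-- The partition loop emits, for each input pair, its index together with the
-- frequency of its character among the input pairs (as a multiset).
theorem freqSeqAltLoop_perm : ∀ (pairs : List (Int × Char)),
    (freqSeqAltLoop pairs).Perm
      (pairs.map (fun p => (p.1, PySem.Int.toChars (((pairs.map (fun q => q.2)).count p.2 : Nat) : Int)))) := by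
  intro pairs
  induction pairs using freqSeqAltLoop.induct with
  | case1 => simp [freqSeqAltLoop]
  | case2 i c rest others ih =>
    rw [freqSeqAltLoop]
    set pr := (i, c) :: rest with hpr
    have hsame : ∀ p ∈ pr.filter (fun p => p.2 == c), p.2 = c := by
      intro p hp
      have := List.of_mem_filter hp
      simpa using this
    have hothers : ∀ p ∈ pr.filter (fun p => !(p.2 == c)), p.2 ≠ c := by
      intro p hp
      have := List.of_mem_filter hp
      simpa using this
    -- length of the equal group = count of c among all characters
    have hcnt : (pr.filter (fun p => p.2 == c)).length = (pr.map (fun q => q.2)).count c := by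
      rw [List.count_eq_countP, List.countP_map, List.countP_eq_length_filter]
      rfl
    -- counts of surviving characters are unchanged by the filter
    have hkeep : ∀ p : Int × Char, p.2 ≠ c →
        ((pr.filter (fun q => !(q.2 == c))).map (fun q => q.2)).count p.2
          = (pr.map (fun q => q.2)).count p.2 := by
      intro p hpc
      rw [List.count_eq_countP, List.countP_map, List.count_eq_countP, List.countP_map,
          List.countP_filter]
      apply List.countP_congr
      intro q _
      by_cases h : q.2 = p.2 <;> simp [h, hpc]
    have h1 : (pr.filter (fun p => p.2 == c)).map
          (fun p => (p.1, PySem.Int.toChars (((pr.filter (fun p => p.2 == c)).length : Nat) : Int)))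
        = (pr.filter (fun p => p.2 == c)).map
          (fun p => (p.1, PySem.Int.toChars (((pr.map (fun q => q.2)).count p.2 : Nat) : Int))) := by
      apply List.map_congr_left
      intro p hp
      rw [hcnt, hsame p hp]
    have h2 : (freqSeqAltLoop (pr.filter (fun q => !(q.2 == c)))).Perm
        ((pr.filter (fun q => !(q.2 == c))).map
          (fun p => (p.1, PySem.Int.toChars (((pr.map (fun q => q.2)).count p.2 : Nat) : Int)))) := by
      refine ih.trans (List.Perm.of_eq ?_)
      apply List.map_congr_left
      intro p hp
      rw [hkeep p (hothers p hp)]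
    have hA : ((pr.filter (fun p => p.2 == c)).map
          (fun p => (p.1, PySem.Int.toChars (((pr.filter (fun p => p.2 == c)).length : Nat) : Int)))
          ++ freqSeqAltLoop (pr.filter (fun q => !(q.2 == c)))).Perm
        ((pr.filter (fun p => p.2 == c)).map
          (fun p => (p.1, PySem.Int.toChars (((pr.map (fun q => q.2)).count p.2 : Nat) : Int)))
          ++ (pr.filter (fun q => !(q.2 == c))).map
          (fun p => (p.1, PySem.Int.toChars (((pr.map (fun q => q.2)).count p.2 : Nat) : Int)))) := by
      rw [h1]; exact List.Perm.append_left _ h2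
    have hB : ((pr.filter (fun p => p.2 == c)).map
          (fun p => (p.1, PySem.Int.toChars (((pr.map (fun q => q.2)).count p.2 : Nat) : Int)))
          ++ (pr.filter (fun q => !(q.2 == c))).map
          (fun p => (p.1, PySem.Int.toChars (((pr.map (fun q => q.2)).count p.2 : Nat) : Int)))).Perm
        (pr.map (fun p => (p.1, PySem.Int.toChars (((pr.map (fun q => q.2)).count p.2 : Nat) : Int)))) := by
      rw [← List.map_append]
      exact (List.filter_append_perm _ pr).map _
    exact hA.trans hB

-- B's value is the same canonical expression.
theorem freq_seq_alt_eq_canonical (words sep : String) :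
    freq_seq_alt words sep
      = String.ofList (PySem.Chars.join sep.toList
          (words.toList.map (fun c => PySem.Int.toChars ((words.toList.count c : Nat) : Int)))) := by
  unfold freq_seq_alt
  dsimp only
  have hperm := freqSeqAltLoop_perm (PySem.List.enumerate words.toList 0)
  rw [PySem.List.map_snd_enumerate] at hperm
  have hsorted : PySem.List.sorted (freqSeqAltLoop (PySem.List.enumerate words.toList 0))
      (fun p => p.1) false
      = (PySem.List.enumerate words.toList 0).map
          (fun p => (p.1, PySem.Int.toChars ((words.toList.count p.2 : Nat) : Int))) := by
    apply PySem.List.sorted_eq_of_perm_of_pairwise_lt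
    · exact hperm.symm
    · exact (PySem.List.pairwise_lt_enumerate words.toList 0).map _ (fun a b h => h)
  rw [hsorted]
  congr 1
  congr 1
  rw [List.map_map]
  have hcomp : ((fun p : Int × List Char => p.2) ∘
        (fun p : Int × Char => (p.1, PySem.Int.toChars ((words.toList.count p.2 : Nat) : Int))))
      = (fun c => PySem.Int.toChars ((words.toList.count c : Nat) : Int)) ∘ (fun p : Int × Char => p.2) := rfl
  rw [hcomp, ← List.map_map, PySem.List.map_snd_enumerate]

-- ===== VERDICT (by name: the statement is the Claim_ definition above) =====
theorem freq_seq_spec : Claim_equal_freq_seq := by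
  intro words sep _
  unfold Spec_freq_seq
  rw [freq_seq_eq_canonical, freq_seq_alt_eq_canonical]
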